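-- pv_equiv track=rewrite | github.com/DanielBerns/experiments_with_python | scripts/009/insertion_context.py | find_insertion_context
-- ===== SOURCE A (Python) =====
-- import bisect
-- from typing import List, Tuple, Optional
--
-- def find_insertion_context(reference: List[str], candidate: List[str]) -> List[Tuple[Optional[str], str, Optional[str]]]:
--     """
--     For each element in the candidate list, finds its insertion point in the
--     sorted reference list and returns the element, along with the elements
--     immediately before and after the insertion point.
--
--     This function leverages the `bisect` module for efficient O(log n) lookups,
--     making it suitable for very large lists.
--
--     Args:
--         reference: A sorted list of strings where context will be found.
--         candidate: A list of strings to find context for.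
--
--     Returns:
--         A list of tuples. Each tuple contains three elements:
--         - The element from the reference list just before the insertion point (or None).
--         - The element from the candidate list.
--         - The element from the reference list at the insertion point (or None).
--     """
--     results = []
--     for item in candidate:
--         # Find the insertion point using binary search.
--         # This is the index where 'item' would be inserted.
--         ip = bisect.bisect_left(reference, item)
--
--         # Determine the element before the insertion point, handling the edge case
--         # where the insertion point is at the beginning of the list.
--         before = reference[ip - 1] if ip > 0 else None
--
--         # Determine the element after the insertion point, handling the edge case
--         # where the insertion point is at the end of the list.
--         after = reference[ip] if ip < len(reference) else None
--
--         results.append((before, item, after))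
--     return results
-- ===== SOURCE B (Python) =====
-- from typing import List, Tuple, Optional
--
-- def find_insertion_context(reference: List[str], candidate: List[str]) -> List[Tuple[Optional[str], str, Optional[str]]]:
--     # One stable sort of the candidates plus a single linear merge walk over the
--     # sorted reference (advancing pointer j), instead of a binary search per item.
--     n = len(reference)
--     tagged = sorted(enumerate(candidate), key=lambda p: p[1])
--     j = 0
--     acc = []
--     for i, item in tagged:
--         while j < n and reference[j] < item:
--             j += 1
--         before = reference[j - 1] if j > 0 else None
--         after = reference[j] if j < n else None
--         acc.append((i, (before, item, after)))
--     acc.sort(key=lambda p: p[0])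
--     return [t for _, t in acc]
-- ===== Notes on version B (the rewrite author's own statement) =====
-- stated objective: alternative
-- what changed: Replaces the per-candidate binary search with one stable sort of the candidates followed by a single advancing merge pointer over the sorted reference, restoring original order at the end.
-- outside the precondition, e.g. on find_insertion_context(['c', 'a'], ['b']): A returns [('a', 'b', None)], B returns [(None, 'b', 'c')]
import Mathlib
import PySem

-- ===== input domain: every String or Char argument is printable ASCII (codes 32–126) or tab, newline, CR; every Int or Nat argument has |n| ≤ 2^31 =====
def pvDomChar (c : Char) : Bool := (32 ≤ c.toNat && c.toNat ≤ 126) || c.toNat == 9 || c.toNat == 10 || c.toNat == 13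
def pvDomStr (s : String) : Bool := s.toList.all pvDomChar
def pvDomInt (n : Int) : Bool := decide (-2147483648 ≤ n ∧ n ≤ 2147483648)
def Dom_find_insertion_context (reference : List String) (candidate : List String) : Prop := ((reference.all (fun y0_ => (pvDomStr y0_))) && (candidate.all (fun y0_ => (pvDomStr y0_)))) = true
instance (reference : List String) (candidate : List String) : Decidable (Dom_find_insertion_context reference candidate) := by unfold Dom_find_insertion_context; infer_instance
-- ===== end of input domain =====

-- B replaces per-candidate binary search by one stable sort of the candidates plus a single
-- advancing merge pointer over the sorted reference (alternative decomposition, same results).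


-- ===== PORT A =====
def find_insertion_context (reference : List String) (candidate : List String) : List (Option String × String × Option String) :=
  candidate.foldl (fun results item =>
    let ip := PySem.List.bisectLeft reference item
    let before := if 0 < ip then reference[ip - 1]? else none
    let after := if ip < reference.length then reference[ip]? else none
    results ++ [(before, item, after)]) []

-- ===== PORT B =====
-- while j < n and reference[j] < item: j += 1
def pvAdvance (reference : List String) (x : String) (j : Nat) : Nat :=
  if h : j < reference.length then
    if reference[j] < x then pvAdvance reference x (j + 1) else j
  else j
termination_by reference.length - j

def find_insertion_context_alt (reference : List String) (candidate : List String) : List (Option String × String × Option String) :=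
  let n := reference.length
  let tagged := PySem.List.sorted (PySem.List.enumerate candidate) (fun p => p.2)
  let st := tagged.foldl (fun (st : Nat × List (Int × (Option String × String × Option String))) p =>
    let j := pvAdvance reference p.2 st.1
    let before := if 0 < j then reference[j - 1]? else none
    let after := if j < n then reference[j]? else none
    (j, st.2 ++ [(p.1, (before, p.2, after))])) (0, [])
  (PySem.List.sorted st.2 (fun p => p.1)).map (fun p => p.2)

-- ===== PRECONDITION & SPEC =====
-- Pre_ excludes inputs with a non-empty candidate list and an unsorted `reference`: the
-- function's contract ("a sorted list") requires a sorted reference, and on unsorted input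
-- A's bisect result is an accident of binary search that B's linear merge cannot reproduce.
def Pre_find_insertion_context (reference : List String) (candidate : List String) : Prop :=
  candidate = [] ∨ reference.Pairwise (fun a b => a.toList ≤ b.toList)
instance (reference : List String) (candidate : List String) : Decidable (Pre_find_insertion_context reference candidate) := by unfold Pre_find_insertion_context; infer_instance

def pvWitness_find_insertion_context : List String × List String := (["b", "d"], ["a", "d", "e"])

def Spec_find_insertion_context (reference : List String) (candidate : List String) (out : List (Option String × String × Option String)) : Prop := out = find_insertion_context_alt reference candidate
instance (reference : List String) (candidate : List String) (out : List (Option String × String × Option String)) : Decidable (Spec_find_insertion_context reference candidate out) := by unfold Spec_find_insertion_context; infer_instance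

-- ===== CLAIM (what is proved, stated in full; the proofs are below) =====
def Claim_equal_find_insertion_context : Prop := ∀ (reference : List String) (candidate : List String), Dom_find_insertion_context reference candidate → Pre_find_insertion_context reference candidate → Spec_find_insertion_context reference candidate (find_insertion_context reference candidate)

-- ===== LEMMAS AND PROOFS =====

-- Index of the leftmost insertion point: length of the strictly-smaller prefix.
def pvF (reference : List String) (x : String) : Nat :=
  (reference.takeWhile (fun r => decide (r < x))).length

lemma pvF_le (reference : List String) (x : String) : pvF reference x ≤ reference.length := by
  exact (List.takeWhile_prefix _).length_le

lemma pvF_lt_at (reference : List String) (x : String) (i : Nat) (hi : i < pvF reference x)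
    (h : i < reference.length) : reference[i] < x := by
  have hp := (List.takeWhile_prefix (l := reference) (fun r => decide (r < x)))
  have he : (reference.takeWhile (fun r => decide (r < x)))[i] = reference[i] :=
    hp.getElem (i := i) hi
  have hm : (reference.takeWhile (fun r => decide (r < x)))[i] ∈
      reference.takeWhile (fun r => decide (r < x)) := List.getElem_mem hi
  have := List.mem_takeWhile_imp hm
  rw [he] at this
  simpa using this

lemma pvF_not_lt (reference : List String) (x : String) (h : pvF reference x < reference.length) :
    ¬ reference[pvF reference x] < x := by
  induction reference with
  | nil => simp at h
  | cons a t ih =>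
    by_cases ha : a < x
    · have ha' : a.toList < x.toList := String.lt_iff_toList_lt.mp ha
      have hF : pvF (a :: t) x = pvF t x + 1 := by
        simp [pvF, List.takeWhile_cons, ha']
      simp only [hF, List.getElem_cons_succ]
      rw [hF] at h
      exact ih (by simpa using h)
    · have ha' : ¬ a.toList < x.toList := fun hc => ha (String.lt_iff_toList_lt.mpr hc)
      have hF : pvF (a :: t) x = 0 := by
        simp [pvF, List.takeWhile_cons, ha']
      simp only [hF, List.getElem_cons_zero]
      exact ha

lemma pvF_gt (reference : List String) (x : String)
    (hs : reference.Pairwise (fun a b => a ≤ b)) (m : Nat) (hm : m < reference.length)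
    (h : reference[m] < x) : m < pvF reference x := by
  by_contra hc
  simp only [not_lt] at hc
  have hFlen : pvF reference x < reference.length := lt_of_le_of_lt hc hm
  have hnot := pvF_not_lt reference x hFlen
  rcases Nat.lt_or_ge (pvF reference x) m with hlt | hge
  · have hle : reference[pvF reference x] ≤ reference[m] :=
      List.pairwise_iff_getElem.mp hs _ _ hFlen hm hlt
    exact hnot (lt_of_le_of_lt hle h)
  · have heq : pvF reference x = m := le_antisymm hc hge
    simp only [heq] at hnot
    exact hnot h

lemma pvF_mono (reference : List String) {x y : String} (hxy : x ≤ y) :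
    pvF reference x ≤ pvF reference y := by
  by_contra hc
  simp only [not_le] at hc
  have h1 : pvF reference y < reference.length := lt_of_lt_of_le hc (pvF_le reference x)
  have h2 : reference[pvF reference y] < x := pvF_lt_at reference x _ hc h1
  exact pvF_not_lt reference y h1 (lt_of_lt_of_le h2 hxy)

-- the common per-item result
def pvCtx (reference : List String) (x : String) : Option String × String × Option String :=
  (if 0 < pvF reference x then reference[pvF reference x - 1]? else none, x,
   if pvF reference x < reference.length then reference[pvF reference x]? else none)

lemma bisect_loop_eq_pvF (reference : List String) (x : String)
    (hs : reference.Pairwise (fun a b => a ≤ b)) :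
    ∀ (fuel lo hi : Nat), lo ≤ pvF reference x → pvF reference x ≤ hi →
      hi ≤ reference.length → hi - lo ≤ fuel →
      PySem.List.bisectLeftLoop reference x fuel lo hi = pvF reference x := by
  intro fuel
  induction fuel with
  | zero =>
    intro lo hi h1 h2 h3 h4
    have : lo = pvF reference x := by omega
    simp [PySem.List.bisectLeftLoop, this]
  | succ fuel ih =>
    intro lo hi h1 h2 h3 h4
    by_cases hlh : lo < hi
    · have hmidlt : (lo + hi) / 2 < hi := by omega
      have hmidge : lo ≤ (lo + hi) / 2 := by omega
      have hmidlen : (lo + hi) / 2 < reference.length := lt_of_lt_of_le hmidlt h3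
      have hget : reference[(lo + hi) / 2]? = some reference[(lo + hi) / 2] :=
        List.getElem?_eq_getElem hmidlen
      by_cases hx : reference[(lo + hi) / 2] < x
      · have hstep : PySem.List.bisectLeftLoop reference x (fuel + 1) lo hi =
            PySem.List.bisectLeftLoop reference x fuel ((lo + hi) / 2 + 1) hi := by
          rw [PySem.List.bisectLeftLoop, if_pos hlh, hget]; exact if_pos hx
        rw [hstep]
        exact ih _ hi (pvF_gt reference x hs _ hmidlen hx) h2 h3 (by omega)
      · have hFmid : pvF reference x ≤ (lo + hi) / 2 := by
          by_contra hc
          exact hx (pvF_lt_at reference x _ (by omega) hmidlen)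
        have hstep : PySem.List.bisectLeftLoop reference x (fuel + 1) lo hi =
            PySem.List.bisectLeftLoop reference x fuel lo ((lo + hi) / 2) := by
          rw [PySem.List.bisectLeftLoop, if_pos hlh, hget]; exact if_neg hx
        rw [hstep]
        exact ih lo _ h1 hFmid (le_of_lt hmidlen) (by omega)
    · have hle : lo = pvF reference x := by omega
      rw [PySem.List.bisectLeftLoop, if_neg hlh]
      exact hle

lemma bisect_eq_pvF (reference : List String) (x : String)
    (hs : reference.Pairwise (fun a b => a ≤ b)) :
    PySem.List.bisectLeft reference x = pvF reference x := by
  exact bisect_loop_eq_pvF reference x hs reference.length 0 reference.length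
    (Nat.zero_le _) (pvF_le reference x) le_rfl (by omega)

lemma advance_eq_pvF (reference : List String) (x : String) (j : Nat)
    (hj : j ≤ pvF reference x) : pvAdvance reference x j = pvF reference x := by
  rcases Nat.lt_or_ge j (pvF reference x) with hlt | hge
  · have hjl : j < reference.length := lt_of_lt_of_le hlt (pvF_le reference x)
    have hx : reference[j] < x := pvF_lt_at reference x j hlt hjl
    rw [pvAdvance]
    simp only [hjl, dif_pos, hx, if_pos]
    exact advance_eq_pvF reference x (j + 1) hlt
  · have hje : j = pvF reference x := le_antisymm hj hge
    subst hje
    rw [pvAdvance]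
    by_cases hl : pvF reference x < reference.length
    · simp only [hl, dif_pos]
      have := pvF_not_lt reference x hl
      simp [this]
    · simp [hl]
termination_by pvF reference x - j

lemma A_eq_map (reference : List String)
    (hs : reference.Pairwise (fun a b => a ≤ b)) :
    ∀ (cand : List String) (acc : List (Option String × String × Option String)),
      cand.foldl (fun results item =>
        let ip := PySem.List.bisectLeft reference item
        let before := if 0 < ip then reference[ip - 1]? else none
        let after := if ip < reference.length then reference[ip]? else none
        results ++ [(before, item, after)]) acc = acc ++ cand.map (pvCtx reference) := by
  intro cand
  induction cand with
  | nil => intro acc; simp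
  | cons item t ih =>
    intro acc
    simp only [List.foldl_cons, List.map_cons, ih]
    rw [bisect_eq_pvF reference item hs]
    simp [pvCtx]

lemma B_fold_eq_map (reference : List String) :
    ∀ (l : List (Int × String)) (j0 : Nat)
      (acc : List (Int × (Option String × String × Option String))),
      l.Pairwise (fun a b => a.2 ≤ b.2) → (∀ p ∈ l, j0 ≤ pvF reference p.2) →
      (l.foldl (fun (st : Nat × List (Int × (Option String × String × Option String))) p =>
        (pvAdvance reference p.2 st.1,
         st.2 ++ [(p.1, (if 0 < pvAdvance reference p.2 st.1 then
             reference[pvAdvance reference p.2 st.1 - 1]? else none, p.2,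
           if pvAdvance reference p.2 st.1 < reference.length then
             reference[pvAdvance reference p.2 st.1]? else none))])) (j0, acc)).2 =
      acc ++ l.map (fun p => (p.1, pvCtx reference p.2)) := by
  intro l
  induction l with
  | nil => intro j0 acc _ _; simp
  | cons p t ih =>
    intro j0 acc hpw hbound
    have hadv : pvAdvance reference p.2 j0 = pvF reference p.2 :=
      advance_eq_pvF reference p.2 j0 (hbound p (List.mem_cons_self))
    simp only [List.foldl_cons, List.map_cons, hadv]
    rw [ih (pvF reference p.2) _ hpw.of_cons
      (fun q hq => pvF_mono reference ((List.pairwise_cons.mp hpw).1 q hq))]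
    simp [pvCtx]

theorem find_insertion_context_spec : Claim_equal_find_insertion_context := by
  unfold Claim_equal_find_insertion_context
  intro reference candidate _ hpre
  unfold Spec_find_insertion_context
  unfold Pre_find_insertion_context at hpre
  rcases hpre with hnil | hpre
  · subst hnil; rfl
  replace hpre : reference.Pairwise (fun a b => a ≤ b) :=
    hpre.imp (fun h => String.le_iff_toList_le.mpr h)
  have hA : find_insertion_context reference candidate = candidate.map (pvCtx reference) := by
    unfold find_insertion_context
    simpa using A_eq_map reference hpre candidate []
  have hBfold := B_fold_eq_map reference
    (PySem.List.sorted (PySem.List.enumerate candidate) (fun p => p.2)) 0 []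
    (PySem.List.sorted_pairwise _ _) (fun _ _ => Nat.zero_le _)
  have hsorted : PySem.List.sorted
      ((PySem.List.sorted (PySem.List.enumerate candidate) (fun p => p.2)).map
        (fun p => (p.1, pvCtx reference p.2))) (fun p => p.1) =
      (PySem.List.enumerate candidate).map (fun p => (p.1, pvCtx reference p.2)) := by
    apply PySem.List.sorted_eq_of_perm_of_pairwise_lt
    · exact (List.Perm.map _ (PySem.List.sorted_perm _ _ _)).symm
    · have := PySem.List.pairwise_lt_enumerate (xs := candidate) (s := 0)
      exact this.map _ (fun a b h => h)
  have hB : find_insertion_context_alt reference candidate = candidate.map (pvCtx reference) := by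
    simp only [find_insertion_context_alt]
    rw [hBfold]
    simp only [List.nil_append, hsorted, List.map_map]
    have h2 : ((PySem.List.enumerate candidate).map (fun p => p.2)) = candidate :=
      PySem.List.map_snd_enumerate candidate 0
    have h3 : ((PySem.List.enumerate candidate).map
          ((fun p => p.2) ∘ (fun p : Int × String => (p.1, pvCtx reference p.2)))) =
        ((PySem.List.enumerate candidate).map ((pvCtx reference) ∘ (fun p => p.2))) := rfl
    rw [h3, ← List.map_map, h2]
  rw [hA, hB]
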